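-- pv_equiv track=rewrite | github.com/imaginary-cherry/mageflow | libs/mageflow/mageflow/testing/_adapter.py | _format_diff
-- ===== SOURCE A (Python) =====
-- def _format_diff(expected: dict, actual: dict) -> str:
--     """Return a human-readable diff between expected and actual dicts."""
--     lines = []
--     all_keys = sorted(set(expected) | set(actual))
--     for key in all_keys:
--         in_expected = key in expected
--         in_actual = key in actual
--         if in_expected and in_actual:
--             if expected[key] != actual[key]:
--                 lines.append(
--                     f"  Expected {key}={expected[key]!r} but got {key}={actual[key]!r}"
--                 )
--         elif in_expected and not in_actual:
--             lines.append(f"  Expected {key}={expected[key]!r} but key was missing")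
--         elif in_actual and not in_expected:
--             lines.append(f"  Unexpected key {key}={actual[key]!r}")
--     return "\n".join(lines) if lines else "(no specific diff available)"
-- ===== SOURCE B (Python) =====
-- def _format_diff(expected: dict, actual: dict) -> str:
--     """Return a human-readable diff between expected and actual dicts."""
--     e, a = sorted(expected), sorted(actual)
--     lines = []
--     i = j = 0
--     while i < len(e) and j < len(a):
--         if e[i] == a[j]:
--             k = e[i]
--             if expected[k] != actual[k]:
--                 lines.append(f"  Expected {k}={expected[k]!r} but got {k}={actual[k]!r}")
--             i += 1
--             j += 1
--         elif e[i] < a[j]: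
--             k = e[i]
--             lines.append(f"  Expected {k}={expected[k]!r} but key was missing")
--             i += 1
--         else:
--             k = a[j]
--             lines.append(f"  Unexpected key {k}={actual[k]!r}")
--             j += 1
--     while i < len(e):
--         k = e[i]
--         lines.append(f"  Expected {k}={expected[k]!r} but key was missing")
--         i += 1
--     while j < len(a):
--         k = a[j]
--         lines.append(f"  Unexpected key {k}={actual[k]!r}")
--         j += 1
--     return "\n".join(lines) if lines else "(no specific diff available)"
-- ===== Notes on version B (the rewrite author's own statement) =====
-- stated objective: alternative
-- what changed: A sorts the union of the keys and classifies each key with membership tests inside one branching scan; B sorts the two key lists separately and produces the lines by a two-pointer merge of the sorted lists, so no union set and no membership test exists at all.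
import Mathlib
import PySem

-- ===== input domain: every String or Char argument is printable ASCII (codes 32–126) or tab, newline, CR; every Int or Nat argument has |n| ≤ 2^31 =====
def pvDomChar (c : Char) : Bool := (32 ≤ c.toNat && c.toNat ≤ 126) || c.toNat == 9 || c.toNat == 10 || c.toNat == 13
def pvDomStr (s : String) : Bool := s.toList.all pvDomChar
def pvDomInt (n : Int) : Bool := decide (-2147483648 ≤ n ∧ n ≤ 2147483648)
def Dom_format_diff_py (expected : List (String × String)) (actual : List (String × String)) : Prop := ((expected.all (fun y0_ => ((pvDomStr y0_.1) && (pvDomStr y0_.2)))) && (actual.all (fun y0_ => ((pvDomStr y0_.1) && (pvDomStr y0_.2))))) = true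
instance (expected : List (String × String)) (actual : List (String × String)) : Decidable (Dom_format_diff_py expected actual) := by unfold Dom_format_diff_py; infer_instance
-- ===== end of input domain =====

-- B replaces A's branching scan over the sorted key union (with membership tests) by a
-- two-pointer merge of the two separately sorted key lists
-- (objective: alternative algorithm, same cost).

-- Shared built-ins: Python's repr(s) for an ASCII str (exact for printable ASCII + tab/newline/CR)
def pyReprStr (s : String) : String :=
  let cs := s.toList
  let q : Char := if cs.contains '\'' && !cs.contains '"' then '"' else '\''
  let body := cs.foldl (fun acc c =>
    acc ++ (if c = '\\' then "\\\\"
      else if c = q then "\\" ++ q.toString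
      else if c = '\t' then "\\t"
      else if c = '\n' then "\\n"
      else if c = '\r' then "\\r"
      else c.toString)) ""
  q.toString ++ body ++ q.toString

-- d[key] (first-match association-list lookup; only used where the key is present)
def pvLookup (d : List (String × String)) (k : String) : String :=
  ((d.find? (fun p => p.1 == k)).map Prod.snd).getD ""

-- ===== PORT A =====
def format_diff_py (expected : List (String × String)) (actual : List (String × String)) : String :=
  let allKeys := PySem.List.sorted
    (PySem.Set.union (PySem.Set.ofList (expected.map Prod.fst)) (PySem.Set.ofList (actual.map Prod.fst)))
    (fun x => x) false
  let lines := allKeys.foldl (fun lines key =>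
    let inE := (expected.map Prod.fst).contains key
    let inA := (actual.map Prod.fst).contains key
    if inE && inA then
      if pvLookup expected key ≠ pvLookup actual key then
        lines ++ ["  Expected " ++ key ++ "=" ++ pyReprStr (pvLookup expected key) ++
                  " but got " ++ key ++ "=" ++ pyReprStr (pvLookup actual key)]
      else lines
    else if inE && !inA then
      lines ++ ["  Expected " ++ key ++ "=" ++ pyReprStr (pvLookup expected key) ++ " but key was missing"]
    else if inA && !inE then
      lines ++ ["  Unexpected key " ++ key ++ "=" ++ pyReprStr (pvLookup actual key)]
    else lines) []
  if lines ≠ [] then PySem.Str.join "\n" lines else "(no specific diff available)"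

-- ===== PORT B =====
-- Source B's two while-loop pointer walk, as structural recursion on the two sorted key lists
def pvMerge (expected : List (String × String)) (actual : List (String × String)) :
    List String → List String → List String
  | e0 :: e, a0 :: a =>
      if e0 = a0 then
        (if pvLookup expected e0 ≠ pvLookup actual e0 then
          ["  Expected " ++ e0 ++ "=" ++ pyReprStr (pvLookup expected e0) ++
           " but got " ++ e0 ++ "=" ++ pyReprStr (pvLookup actual e0)]
         else []) ++ pvMerge expected actual e a
      else if e0 < a0 then
        ("  Expected " ++ e0 ++ "=" ++ pyReprStr (pvLookup expected e0) ++ " but key was missing")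
          :: pvMerge expected actual e (a0 :: a)
      else
        ("  Unexpected key " ++ a0 ++ "=" ++ pyReprStr (pvLookup actual a0))
          :: pvMerge expected actual (e0 :: e) a
  | e0 :: e, [] =>
      ("  Expected " ++ e0 ++ "=" ++ pyReprStr (pvLookup expected e0) ++ " but key was missing")
        :: pvMerge expected actual e []
  | [], a0 :: a =>
      ("  Unexpected key " ++ a0 ++ "=" ++ pyReprStr (pvLookup actual a0))
        :: pvMerge expected actual [] a
  | [], [] => []
  termination_by e a => e.length + a.length

def format_diff_py_alt (expected : List (String × String)) (actual : List (String × String)) : String :=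
  let e := PySem.List.sorted (PySem.Set.ofList (expected.map Prod.fst)) (fun x => x) false
  let a := PySem.List.sorted (PySem.Set.ofList (actual.map Prod.fst)) (fun x => x) false
  let lines := pvMerge expected actual e a
  if lines ≠ [] then PySem.Str.join "\n" lines else "(no specific diff available)"

-- ===== PRECONDITION & SPEC =====
def Spec_format_diff_py (expected : List (String × String)) (actual : List (String × String)) (out : String) : Prop := out = format_diff_py_alt expected actual
instance (expected : List (String × String)) (actual : List (String × String)) (out : String) : Decidable (Spec_format_diff_py expected actual out) := by unfold Spec_format_diff_py; infer_instance

-- ===== CLAIM (what is proved, stated in full; the proofs are below) =====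
def Claim_equal_format_diff_py : Prop := ∀ (expected : List (String × String)) (actual : List (String × String)), Dom_format_diff_py expected actual → Spec_format_diff_py expected actual (format_diff_py expected actual)

-- ===== LEMMAS AND PROOFS =====

-- The per-key message decided by A's branch for one key (none = no line for this key)
def pvMsg (expected : List (String × String)) (actual : List (String × String)) (key : String) : Option String :=
  let inE := (expected.map Prod.fst).contains key
  let inA := (actual.map Prod.fst).contains key
  if inE && inA then
    if pvLookup expected key ≠ pvLookup actual key then
      some ("  Expected " ++ key ++ "=" ++ pyReprStr (pvLookup expected key) ++
            " but got " ++ key ++ "=" ++ pyReprStr (pvLookup actual key))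
    else none
  else if inE && !inA then
    some ("  Expected " ++ key ++ "=" ++ pyReprStr (pvLookup expected key) ++ " but key was missing")
  else if inA && !inE then
    some ("  Unexpected key " ++ key ++ "=" ++ pyReprStr (pvLookup actual key))
  else none

-- Per-key message relative to two key LISTS (what the merge position knows)
def pvMsgL (expected : List (String × String)) (actual : List (String × String))
    (e a : List String) (k : String) : Option String :=
  if k ∈ e then
    (if k ∈ a then
      (if pvLookup expected k ≠ pvLookup actual k then
        some ("  Expected " ++ k ++ "=" ++ pyReprStr (pvLookup expected k) ++
              " but got " ++ k ++ "=" ++ pyReprStr (pvLookup actual k))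
       else none)
     else some ("  Expected " ++ k ++ "=" ++ pyReprStr (pvLookup expected k) ++ " but key was missing"))
  else if k ∈ a then some ("  Unexpected key " ++ k ++ "=" ++ pyReprStr (pvLookup actual k))
  else none

-- the sorted merged union of two strictly sorted key lists (keyMerge mirrors pvMerge's walk)
def pvKeyMerge : List String → List String → List String
  | e0 :: e, a0 :: a =>
      if e0 = a0 then e0 :: pvKeyMerge e a
      else if e0 < a0 then e0 :: pvKeyMerge e (a0 :: a)
      else a0 :: pvKeyMerge (e0 :: e) a
  | e, [] => e
  | [], a => a
  termination_by e a => e.length + a.length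

lemma pvKeyMerge_nil_right : ∀ e : List String, pvKeyMerge e [] = e := by
  intro e; cases e <;> rw [pvKeyMerge]

lemma pvKeyMerge_nil_left : ∀ a : List String, pvKeyMerge [] a = a := by
  intro a; cases a <;> rw [pvKeyMerge] <;> simp

lemma mem_pvKeyMerge : ∀ (e a : List String) (k : String),
    k ∈ pvKeyMerge e a ↔ k ∈ e ∨ k ∈ a := by
  intro e a
  induction e, a using pvKeyMerge.induct with
  | case1 e a0 a ih =>
      intro k; rw [pvKeyMerge, if_pos rfl]
      simp [ih]; tauto
  | case2 e0 e a0 a hne hlt ih =>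
      intro k; rw [pvKeyMerge, if_neg hne, if_pos hlt]
      simp [ih]; tauto
  | case3 e0 e a0 a hne hnlt ih =>
      intro k; rw [pvKeyMerge, if_neg hne, if_neg hnlt]
      simp [ih]; tauto
  | case4 e => intro k; simp [pvKeyMerge_nil_right]
  | case5 a _ => intro k; simp [pvKeyMerge_nil_left]

lemma pairwise_pvKeyMerge : ∀ (e a : List String),
    e.Pairwise (· < ·) → a.Pairwise (· < ·) → (pvKeyMerge e a).Pairwise (· < ·) := by
  intro e a
  induction e, a using pvKeyMerge.induct with
  | case1 e a0 a ih =>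
      intro he ha; rw [pvKeyMerge, if_pos rfl]
      rw [List.pairwise_cons] at he ha ⊢
      refine ⟨?_, ih he.2 ha.2⟩
      intro k hk
      rcases (mem_pvKeyMerge e a k).mp hk with h | h
      · exact he.1 k h
      · exact ha.1 k h
  | case2 e0 e a0 a hne hlt ih =>
      intro he ha; rw [pvKeyMerge, if_neg hne, if_pos hlt]
      rw [List.pairwise_cons] at he ⊢
      refine ⟨?_, ih he.2 ha⟩
      intro k hk
      rcases (mem_pvKeyMerge e (a0 :: a) k).mp hk with h | h
      · exact he.1 k h
      · rcases List.mem_cons.mp h with rfl | h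
        · exact hlt
        · exact lt_trans hlt ((List.pairwise_cons.mp ha).1 k h)
  | case3 e0 e a0 a hne hnlt ih =>
      intro he ha; rw [pvKeyMerge, if_neg hne, if_neg hnlt]
      have ha0 : a0 < e0 := lt_of_le_of_ne (not_lt.mp hnlt) (fun h => hne h.symm)
      rw [List.pairwise_cons] at ha ⊢
      refine ⟨?_, ih he ha.2⟩
      intro k hk
      rcases (mem_pvKeyMerge (e0 :: e) a k).mp hk with h | h
      · rcases List.mem_cons.mp h with rfl | h
        · exact ha0
        · exact lt_trans ha0 ((List.pairwise_cons.mp he).1 k h)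
      · exact ha.1 k h
  | case4 e => intro he _; simpa [pvKeyMerge_nil_right] using he
  | case5 a _ => intro _ ha; simpa [pvKeyMerge_nil_left] using ha

lemma filterMap_congr_mem {α β : Type} (f g : α → Option β) :
    ∀ xs : List α, (∀ x ∈ xs, f x = g x) → xs.filterMap f = xs.filterMap g := by
  intro xs
  induction xs with
  | nil => intro _; simp
  | cons x xs ih =>
      intro h
      simp only [List.filterMap_cons, h x (by simp), ih (fun y hy => h y (by simp [hy]))]

lemma pvMerge_nil_right (expected actual : List (String × String)) :
    ∀ e : List String, pvMerge expected actual e []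
      = e.map (fun k => "  Expected " ++ k ++ "=" ++ pyReprStr (pvLookup expected k) ++ " but key was missing") := by
  intro e
  induction e with
  | nil => rw [pvMerge]; rfl
  | cons e0 e ih => rw [pvMerge, ih]; rfl

lemma pvMerge_nil_left (expected actual : List (String × String)) :
    ∀ a : List String, pvMerge expected actual [] a
      = a.map (fun k => "  Unexpected key " ++ k ++ "=" ++ pyReprStr (pvLookup actual k)) := by
  intro a
  induction a with
  | nil => rw [pvMerge]; rfl
  | cons a0 a ih => rw [pvMerge, ih]; rfl

-- the merge walk emits exactly the optional message of each key of the merged union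
lemma pvMerge_spec (expected actual : List (String × String)) :
    ∀ (e a : List String), e.Pairwise (· < ·) → a.Pairwise (· < ·) →
      pvMerge expected actual e a
        = (pvKeyMerge e a).filterMap (pvMsgL expected actual e a) := by
  intro e a
  induction e, a using pvKeyMerge.induct with
  | case1 e a0 a ih =>
      intro he ha
      rw [pvMerge, if_pos rfl, pvKeyMerge, if_pos rfl]
      rw [List.pairwise_cons] at he ha
      rw [ih he.2 ha.2, List.filterMap_cons]
      have hhead : pvMsgL expected actual (a0 :: e) (a0 :: a) a0
          = (if pvLookup expected a0 ≠ pvLookup actual a0 then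
              some ("  Expected " ++ a0 ++ "=" ++ pyReprStr (pvLookup expected a0) ++
                    " but got " ++ a0 ++ "=" ++ pyReprStr (pvLookup actual a0)) else none) := by
        simp [pvMsgL]
      have htail : (pvKeyMerge e a).filterMap (pvMsgL expected actual e a)
          = (pvKeyMerge e a).filterMap (pvMsgL expected actual (a0 :: e) (a0 :: a)) := by
        refine filterMap_congr_mem _ _ _ (fun k hk => ?_)
        have hkne : k ≠ a0 := by
          rcases (mem_pvKeyMerge e a k).mp hk with h | h
          · exact ne_of_gt (he.1 k h)
          · exact ne_of_gt (ha.1 k h)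
        simp [pvMsgL, hkne]
      rw [htail, hhead]
      by_cases hne : pvLookup expected a0 ≠ pvLookup actual a0 <;> simp [hne]
  | case2 e0 e a0 a hne0 hlt ih =>
      intro he ha
      rw [pvMerge, if_neg hne0, if_pos hlt, pvKeyMerge, if_neg hne0, if_pos hlt]
      rw [List.pairwise_cons] at he
      rw [ih he.2 ha, List.filterMap_cons]
      have he0a : e0 ∉ a0 :: a := by
        intro h
        rcases List.mem_cons.mp h with rfl | h
        · exact hne0 rfl
        · exact absurd hlt (not_lt.mpr (le_of_lt ((List.pairwise_cons.mp ha).1 e0 h)))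
      have hhead : pvMsgL expected actual (e0 :: e) (a0 :: a) e0
          = some ("  Expected " ++ e0 ++ "=" ++ pyReprStr (pvLookup expected e0) ++ " but key was missing") := by
        simp [pvMsgL, he0a]
      have htail : (pvKeyMerge e (a0 :: a)).filterMap (pvMsgL expected actual e (a0 :: a))
          = (pvKeyMerge e (a0 :: a)).filterMap (pvMsgL expected actual (e0 :: e) (a0 :: a)) := by
        refine filterMap_congr_mem _ _ _ (fun k hk => ?_)
        have hkne : k ≠ e0 := by
          rcases (mem_pvKeyMerge e (a0 :: a) k).mp hk with h | h
          · exact ne_of_gt (he.1 k h)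
          · rcases List.mem_cons.mp h with rfl | h
            · exact ne_of_gt hlt
            · exact ne_of_gt (lt_trans hlt ((List.pairwise_cons.mp ha).1 k h))
        simp [pvMsgL, hkne]
      rw [htail, hhead]
  | case3 e0 e a0 a hne0 hnlt ih =>
      intro he ha
      rw [pvMerge, if_neg hne0, if_neg hnlt, pvKeyMerge, if_neg hne0, if_neg hnlt]
      have ha0 : a0 < e0 := lt_of_le_of_ne (not_lt.mp hnlt) (fun h => hne0 h.symm)
      rw [List.pairwise_cons] at ha
      rw [ih he ha.2, List.filterMap_cons]
      have ha0e : a0 ∉ e0 :: e := by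
        intro h
        rcases List.mem_cons.mp h with rfl | h
        · exact hne0 rfl
        · exact absurd ha0 (not_lt.mpr (le_of_lt ((List.pairwise_cons.mp he).1 a0 h)))
      have hhead : pvMsgL expected actual (e0 :: e) (a0 :: a) a0
          = some ("  Unexpected key " ++ a0 ++ "=" ++ pyReprStr (pvLookup actual a0)) := by
        simp [pvMsgL, ha0e]
      have htail : (pvKeyMerge (e0 :: e) a).filterMap (pvMsgL expected actual (e0 :: e) a)
          = (pvKeyMerge (e0 :: e) a).filterMap (pvMsgL expected actual (e0 :: e) (a0 :: a)) := by
        refine filterMap_congr_mem _ _ _ (fun k hk => ?_)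
        have hkne : k ≠ a0 := by
          rcases (mem_pvKeyMerge (e0 :: e) a k).mp hk with h | h
          · rcases List.mem_cons.mp h with rfl | h
            · exact ne_of_gt ha0
            · exact ne_of_gt (lt_trans ha0 ((List.pairwise_cons.mp he).1 k h))
          · exact ne_of_gt (ha.1 k h)
        simp [pvMsgL, hkne]
      rw [htail, hhead]
  | case4 e =>
      intro _ _
      rw [pvKeyMerge_nil_right, pvMerge_nil_right]
      rw [filterMap_congr_mem (pvMsgL expected actual e []) (fun k =>
        some ("  Expected " ++ k ++ "=" ++ pyReprStr (pvLookup expected k) ++ " but key was missing"))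
        e (fun k hk => by simp [pvMsgL, hk])]
      simp
  | case5 a _ =>
      intro _ _
      rw [pvKeyMerge_nil_left, pvMerge_nil_left]
      rw [filterMap_congr_mem (pvMsgL expected actual [] a) (fun k =>
        some ("  Unexpected key " ++ k ++ "=" ++ pyReprStr (pvLookup actual k)))
        a (fun k hk => by simp [pvMsgL, hk])]
      simp

lemma foldl_push_toList {α β : Type} (g : α → Option β) :
    ∀ (xs : List α) (init : List β),
      xs.foldl (fun acc x => acc ++ (g x).toList) init = init ++ xs.filterMap g := by
  intro xs
  induction xs with
  | nil => intro init; simp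
  | cons x xs ih =>
      intro init
      cases h : g x <;> simp [List.foldl, ih, h]

theorem format_diff_py_main (expected : List (String × String)) (actual : List (String × String)) :
    format_diff_py expected actual = format_diff_py_alt expected actual := by
  -- A's loop body appends exactly the optional message of each key
  have hbody : (fun (lines : List String) key =>
      let inE := (expected.map Prod.fst).contains key
      let inA := (actual.map Prod.fst).contains key
      if inE && inA then
        if pvLookup expected key ≠ pvLookup actual key then
          lines ++ ["  Expected " ++ key ++ "=" ++ pyReprStr (pvLookup expected key) ++
                    " but got " ++ key ++ "=" ++ pyReprStr (pvLookup actual key)]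
        else lines
      else if inE && !inA then
        lines ++ ["  Expected " ++ key ++ "=" ++ pyReprStr (pvLookup expected key) ++ " but key was missing"]
      else if inA && !inE then
        lines ++ ["  Unexpected key " ++ key ++ "=" ++ pyReprStr (pvLookup actual key)]
      else lines)
      = (fun lines key => lines ++ (pvMsg expected actual key).toList) := by
    funext lines key
    dsimp only [pvMsg]
    split_ifs <;> simp
  -- the sorted key lists B merges
  set eS := PySem.List.sorted (PySem.Set.ofList (expected.map Prod.fst)) (fun x => x) false with heS
  set aS := PySem.List.sorted (PySem.Set.ofList (actual.map Prod.fst)) (fun x => x) false with haS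
  have hpe : eS.Pairwise (· < ·) := PySem.List.sorted_ofList_pairwise_lt _
  have hpa : aS.Pairwise (· < ·) := PySem.List.sorted_ofList_pairwise_lt _
  -- pvMsgL over the sorted key lists is pvMsg
  have hmsg : ∀ k, pvMsgL expected actual eS aS k = pvMsg expected actual k := by
    intro k
    have hek : k ∈ eS ↔ k ∈ expected.map Prod.fst := by
      rw [heS, PySem.List.mem_sorted, PySem.Set.mem_ofList]
    have hak : k ∈ aS ↔ k ∈ actual.map Prod.fst := by
      rw [haS, PySem.List.mem_sorted, PySem.Set.mem_ofList]
    by_cases hE : k ∈ expected.map Prod.fst <;> by_cases hA : k ∈ actual.map Prod.fst <;>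
      simp [pvMsgL, pvMsg, hek, hak, hE, hA]
  -- the merged key list is A's sorted union
  have hkm : PySem.List.sorted
      (PySem.Set.union (PySem.Set.ofList (expected.map Prod.fst)) (PySem.Set.ofList (actual.map Prod.fst)))
      (fun x => x) false = pvKeyMerge eS aS := by
    refine PySem.List.sorted_eq_of_perm_of_pairwise_lt _ _ _ ?_ (pairwise_pvKeyMerge _ _ hpe hpa)
    have hnd : (pvKeyMerge eS aS).Nodup := (pairwise_pvKeyMerge _ _ hpe hpa).imp ne_of_lt
    have hndU : (PySem.Set.union (PySem.Set.ofList (expected.map Prod.fst))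
        (PySem.Set.ofList (actual.map Prod.fst))).Nodup :=
      PySem.Set.nodup_union _ _ (PySem.Set.nodup_ofList _)
    rw [List.perm_ext_iff_of_nodup hnd hndU]
    intro k
    rw [mem_pvKeyMerge, PySem.Set.mem_union, heS, haS,
      PySem.List.mem_sorted, PySem.List.mem_sorted]
  -- unfold both ports and identify the line lists
  unfold format_diff_py format_diff_py_alt
  simp only []
  rw [hbody, foldl_push_toList, List.nil_append, hkm,
    pvMerge_spec expected actual eS aS hpe hpa,
    filterMap_congr_mem _ _ _ (fun k _ => hmsg k)]

-- ===== VERDICT (by name: the statement is the Claim_ definition above) =====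
theorem format_diff_py_spec : Claim_equal_format_diff_py := by
  intro expected actual _
  exact format_diff_py_main expected actual
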